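-- pv_equiv track=rewrite | github.com/EulerSearch/embedding_studio | embedding_studio/utils/redis_utils.py | ft_unescape_punctuation
-- ===== SOURCE A (Python) =====
-- def ft_unescape_punctuation(escaped_text: str) -> str:
--     """
--     Inverse of ft_escape_punctuation. Restores the original characters that
--     were escaped for Redis full-text search.
--     """
--
--     # The same mapping from the escape function, reversed.
--     # Key = what ft_escape_punctuation produces, Value = original character
--     # (plus the special case for \x00 => '\0')
--     unescape_map = {
--         "\\ ": " ",
--         "\\\t": "\t",
--         "\\,": ",",
--         "\\.": ".",
--         "\\/": "/",
--         "\\(": "(",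
--         "\\)": ")",
--         "\\{": "{",
--         "\\}": "}",
--         "\\[": "[",
--         "\\]": "]",
--         "\\:": ":",
--         "\\;": ";",
--         "\\\\": "\\",
--         "\\~": "~",
--         "\\!": "!",
--         "\\@": "@",
--         "\\#": "#",
--         "\\$": "$",
--         "\\%": "%",
--         "\\^": "^",
--         "\\&": "&",
--         "\\*": "*",
--         "\\-": "-",
--         "\\=": "=",
--         "\\+": "+",
--         "\\|": "|",
--         "\\'": "'",
--         "\\`": "`",
--         '\\"': '"',
--         "\\<": "<",
--         "\\>": ">",
--         "\\?": "?",
--         "\\_": "_",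
--         "\\x00": "\0",  # special case for the NULL character
--     }
--
--     result = []
--     i = 0
--     n = len(escaped_text)
--
--     while i < n:
--         # If we see a backslash, attempt to interpret it as an escaped sequence.
--         if escaped_text[i] == "\\" and i + 1 < n:
--             # Special check for "\x00" (4 chars)
--             if escaped_text[i : i + 4] == "\\x00":
--                 # It's the NULL-escape sequence
--                 result.append("\0")
--                 i += 4
--                 continue
--
--             # Otherwise, check two characters: e.g. "\,", "\.", "\(", etc.
--             maybe_esc = escaped_text[i : i + 2]
--             # If recognized, append the unescaped char to result
--             if maybe_esc in unescape_map:
--                 result.append(unescape_map[maybe_esc])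
--                 i += 2
--             else:
--                 # Not recognized as a valid escape. We'll just treat the
--                 # '\' as a literal or skip it. Here, let's skip the backslash
--                 # and directly append the next character.
--                 # Another approach is to keep the slash (result.append('\\')), etc.
--                 result.append(escaped_text[i + 1])
--                 i += 2
--         else:
--             # Regular character: just append.
--             result.append(escaped_text[i])
--             i += 1
--
--     return "".join(result)
-- ===== SOURCE B (Python) =====
-- import re
--
-- _UNESC_RE = re.compile(r'\\x00|\\(.)', re.DOTALL)
--
--
-- def ft_unescape_punctuation(escaped_text: str) -> str:
--     """
--     Inverse of ft_escape_punctuation: one regex substitution. "\\x00" becomes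
--     the NUL character; any other backslash followed by a character becomes
--     that character (every two-char escape in the escape map just drops the
--     backslash); a lone trailing backslash is left untouched.
--     """
--     return _UNESC_RE.sub(
--         lambda m: "\0" if m.group(1) is None else m.group(1), escaped_text
--     )
-- ===== Notes on version B (the rewrite author's own statement) =====
-- stated objective: simpler
-- what changed: Replaces the manual index-walking while-loop with its 35-entry unescape dict by a single compiled-regex substitution r'\x00|\(.)' (DOTALL) whose callback returns NUL for the \x00 alternative and otherwise just the captured character, since every two-char escape simply drops the backslash; the scan runs in the C regex engine instead of a per-character Python loop.
import Mathlib
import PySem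

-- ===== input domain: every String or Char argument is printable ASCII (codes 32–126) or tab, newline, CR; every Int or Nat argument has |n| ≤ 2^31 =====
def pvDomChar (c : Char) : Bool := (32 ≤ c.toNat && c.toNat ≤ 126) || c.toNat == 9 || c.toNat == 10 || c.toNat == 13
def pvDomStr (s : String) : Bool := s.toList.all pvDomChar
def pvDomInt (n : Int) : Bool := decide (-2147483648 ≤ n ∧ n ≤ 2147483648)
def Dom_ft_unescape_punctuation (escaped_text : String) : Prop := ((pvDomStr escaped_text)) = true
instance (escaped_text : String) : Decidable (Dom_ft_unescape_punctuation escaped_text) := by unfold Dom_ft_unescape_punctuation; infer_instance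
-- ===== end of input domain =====

-- B replaces A's manual index walk + 35-entry unescape dict by one regex substitution
-- (\x00 → NUL, otherwise drop the backslash); objective: simpler (and measured faster by constant factor). Equivalence of return values.


-- ===== PORT A =====
-- A's unescape_map dict literal (insertion order preserved).
def ftUnescapeMap : PySem.Dict String String :=
  PySem.Dict.ofList [
    ("\\ ", " "),
    ("\\\t", "\t"),
    ("\\,", ","),
    ("\\.", "."),
    ("\\/", "/"),
    ("\\(", "("),
    ("\\)", ")"),
    ("\\{", "{"),
    ("\\}", "}"),
    ("\\[", "["),
    ("\\]", "]"),
    ("\\:", ":"),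
    ("\\;", ";"),
    ("\\\\", "\\"),
    ("\\~", "~"),
    ("\\!", "!"),
    ("\\@", "@"),
    ("\\#", "#"),
    ("\\$", "$"),
    ("\\%", "%"),
    ("\\^", "^"),
    ("\\&", "&"),
    ("\\*", "*"),
    ("\\-", "-"),
    ("\\=", "="),
    ("\\+", "+"),
    ("\\|", "|"),
    ("\\'", "'"),
    ("\\`", "`"),
    ("\\\"", "\""),
    ("\\<", "<"),
    ("\\>", ">"),
    ("\\?", "?"),
    ("\\_", "_"),
    ("\\x00", "\x00")]

-- A's while-loop over index i, as recursion on the suffix escaped_text[i:].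
-- Pattern '\\' :: d :: rest is exactly A's guard  escaped_text[i]=='\\' and i+1 < n ;
-- escaped_text[i:i+4] / [i:i+2] are List.take 4 / take 2 of that suffix (slicing never raises).
set_option maxRecDepth 4096 in
def ftA_go : List Char → List Char
  | [] => []
  | '\\' :: d :: rest =>
      if List.take 4 ('\\' :: d :: rest) = "\\x00".toList then
        -- result.append("\0"); i += 4
        '\x00' :: ftA_go (List.drop 2 rest)
      else
        -- maybe_esc = escaped_text[i:i+2]
        match PySem.Dict.get? ftUnescapeMap (String.ofList (List.take 2 ('\\' :: d :: rest))) with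
        | some v => v.toList ++ ftA_go rest    -- result.append(unescape_map[maybe_esc]); i += 2
        | none => d :: ftA_go rest             -- result.append(escaped_text[i+1]); i += 2
  | c :: rest => c :: ftA_go rest              -- regular character
termination_by cs => cs.length
decreasing_by all_goals (simp [List.length_drop]; try omega)

def ft_unescape_punctuation (escaped_text : String) : String :=
  String.ofList (ftA_go escaped_text.toList)   -- "".join(result)

-- ===== PORT B =====
-- Source B's single re.sub(r'\\x00|\\(.)', …, flags=DOTALL), ported by hand as the regex
-- engine's leftmost scan: at each position try the alternative '\x00' first, then
-- backslash-followed-by-any-char (DOTALL), else the character is not part of a match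
-- and is copied unchanged. Exact for this regex on every input.
def ftB_go : List Char → List Char
  | '\\' :: 'x' :: '0' :: '0' :: rest => '\x00' :: ftB_go rest   -- repl: group(1) is None
  | '\\' :: c :: rest => c :: ftB_go rest                        -- repl: group(1)
  | c :: rest => c :: ftB_go rest                                -- no match here
  | [] => []

def ft_unescape_punctuation_alt (escaped_text : String) : String :=
  String.ofList (ftB_go escaped_text.toList)

-- ===== PRECONDITION & SPEC =====
def Spec_ft_unescape_punctuation (escaped_text : String) (out : String) : Prop := out = ft_unescape_punctuation_alt escaped_text
instance (escaped_text : String) (out : String) : Decidable (Spec_ft_unescape_punctuation escaped_text out) := by unfold Spec_ft_unescape_punctuation; infer_instance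

-- ===== CLAIM (what is proved, stated in full; the proofs are below) =====
def Claim_equal_ft_unescape_punctuation : Prop := ∀ (escaped_text : String), Dom_ft_unescape_punctuation escaped_text → Spec_ft_unescape_punctuation escaped_text (ft_unescape_punctuation escaped_text)

-- ===== LEMMAS AND PROOFS =====

-- Every entry of A's dict is either "backslash + c ↦ c" or the 4-char key "\x00"
-- (which a 2-char maybe_esc can never equal).
lemma ftLookup_aux (l : List (String × String))
    (hl : ∀ p ∈ l, p.1.toList = '\\' :: p.2.toList ∨ p.1 = "\\x00")
    (d : Char) (v : String)
    (h : PySem.Dict.get? (PySem.Dict.mk l) (String.ofList ['\\', d]) = some v) :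
    v.toList = [d] := by
  induction l with
  | nil => simp [pysem] at h
  | cons p t ih =>
    rw [PySem.Dict.get?_mk_cons] at h
    by_cases hb : (p.1 == String.ofList ['\\', d]) = true
    · rw [if_pos hb] at h
      rw [beq_iff_eq] at hb
      have hd := congrArg String.toList hb
      rcases hl p (by simp) with hc | hx
      · rw [hc] at hd
        simp at hd h
        simp [← h, hd]
      · rw [hx] at hd
        simp at hd
    · rw [if_neg hb] at h
      exact ih (fun p hp => hl p (by simp [hp])) h

-- A's successful dict lookup of "\" + d always returns the one-character string d.
lemma ftLookup (d : Char) (v : String)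
    (h : PySem.Dict.get? ftUnescapeMap (String.ofList ['\\', d]) = some v) :
    v.toList = [d] := by
  have e : ftUnescapeMap = PySem.Dict.mk [
    ("\\ ", " "), ("\\\t", "\t"), ("\\,", ","), ("\\.", "."), ("\\/", "/"),
    ("\\(", "("), ("\\)", ")"), ("\\{", "{"), ("\\}", "}"), ("\\[", "["),
    ("\\]", "]"), ("\\:", ":"), ("\\;", ";"), ("\\\\", "\\"), ("\\~", "~"),
    ("\\!", "!"), ("\\@", "@"), ("\\#", "#"), ("\\$", "$"), ("\\%", "%"),
    ("\\^", "^"), ("\\&", "&"), ("\\*", "*"), ("\\-", "-"), ("\\=", "="),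
    ("\\+", "+"), ("\\|", "|"), ("\\'", "'"), ("\\`", "`"), ("\\\"", "\""),
    ("\\<", "<"), ("\\>", ">"), ("\\?", "?"), ("\\_", "_"), ("\\x00", "\x00")] := by
    set_option maxRecDepth 8192 in decide
  rw [e] at h
  exact ftLookup_aux _ (by decide) d v h

-- B reduction when the position is a two-char escape that is not "\x00".
lemma ftB_esc (d : Char) (rest : List Char) (h : ¬(d = 'x' ∧ rest.take 2 = ['0', '0'])) :
    ftB_go ('\\' :: d :: rest) = d :: ftB_go rest := by
  by_cases hx : d = 'x'
  · subst hx
    match rest with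
    | [] => rfl
    | [a] => by_cases ha : a = '0' <;> simp [ftB_go, ha]
    | a :: b :: t =>
      by_cases ha : a = '0'
      · by_cases hb : b = '0'
        · exact absurd ⟨rfl, by simp [ha, hb]⟩ h
        · simp [ftB_go, ha, hb]
      · simp [ftB_go, ha]
  · simp [ftB_go, hx]

lemma ftA_eq_ftB (cs : List Char) : ftA_go cs = ftB_go cs := by
  fun_induction ftA_go cs with
  | case1 => rfl
  | case2 d rest h4 ih =>
    -- the "\x00" branch: the 4-char check pins d = 'x' and rest = '0' :: '0' :: _
    simp at h4
    obtain ⟨hd, ht⟩ := h4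
    subst hd
    cases rest with
    | nil => simp at ht
    | cons a t =>
      cases t with
      | nil => simp at ht
      | cons b t' =>
        simp at ht
        obtain ⟨ha, hb⟩ := ht
        subst ha; subst hb
        simp only [List.drop_succ_cons, List.drop_zero] at ih ⊢
        simp [ftB_go, ih]
  | case3 d rest h4 v hv ih =>
    -- recognized two-char escape
    simp at h4 hv
    rw [ftB_esc d rest (by simpa using h4), ftLookup d v hv, ← ih]
    simp
  | case4 d rest h4 hv ih =>
    -- unrecognized escape: skip the backslash
    simp at h4
    rw [ftB_esc d rest (by simpa using h4), ih]
  | case5 c rest hne ih =>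
    -- regular character (c ≠ '\\' or no following char)
    by_cases hc : c = '\\'
    · subst hc
      cases rest with
      | nil => simp [ftA_go, ftB_go]
      | cons a t => exact ((hne a t rfl rfl).elim)
    · simp [ftB_go, hc, ih]

-- ===== VERDICT (by name: the statement is the Claim_ definition above) =====
theorem ft_unescape_punctuation_spec : Claim_equal_ft_unescape_punctuation := by
  intro s _
  unfold Spec_ft_unescape_punctuation ft_unescape_punctuation ft_unescape_punctuation_alt
  rw [ftA_eq_ftB]
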